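-- pv_equiv track=rewrite | github.com/centepi/walma | A_Level/pipeline_scripts/dynamic_chart_plotter/plotter.py | _default_axes_style_for_charts
-- ===== SOURCE A (Python) =====
-- from typing import Dict, List, Any, Optional, Callable, Tuple
--
-- def _default_axes_style_for_charts(non_tables: List[Dict[str, Any]]) -> str:
--     """
--     Default axes style:
--       - geometry: none (Euclidean diagrams usually shouldn't show axes)
--       - function/parametric: cross (math-style axes through origin)
--       - everything else: L (standard chart axes)
--     """
--     types = []
--     for c in non_tables:
--         if isinstance(c, dict):
--             types.append(str(c.get("type", "")).strip().lower())
--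
--     if any(t == "geometry" for t in types):
--         return "none"
--     if any(t in {"function", "parametric"} for t in types):
--         return "cross"
--     return "l"
-- ===== SOURCE B (Python) =====
-- def _default_axes_style_for_charts(non_tables):
--     """One-pass re-implementation: early return on geometry, flag for cross."""
--     found_cross = False
--     for c in non_tables:
--         if not isinstance(c, dict):
--             continue
--         t = str(c.get("type", "")).strip().lower()
--         if t == "geometry":
--             return "none"
--         if t in ("function", "parametric"):
--             found_cross = True
--     return "cross" if found_cross else "l"
-- ===== Notes on version B (the rewrite author's own statement) =====
-- stated objective: simpler
-- what changed: Replaced the build-a-types-list-then-two-any-scans structure with a single pass over non_tables that returns 'none' immediately on a geometry chart and tracks a found_cross flag, so no intermediate list is built.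
import Mathlib
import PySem

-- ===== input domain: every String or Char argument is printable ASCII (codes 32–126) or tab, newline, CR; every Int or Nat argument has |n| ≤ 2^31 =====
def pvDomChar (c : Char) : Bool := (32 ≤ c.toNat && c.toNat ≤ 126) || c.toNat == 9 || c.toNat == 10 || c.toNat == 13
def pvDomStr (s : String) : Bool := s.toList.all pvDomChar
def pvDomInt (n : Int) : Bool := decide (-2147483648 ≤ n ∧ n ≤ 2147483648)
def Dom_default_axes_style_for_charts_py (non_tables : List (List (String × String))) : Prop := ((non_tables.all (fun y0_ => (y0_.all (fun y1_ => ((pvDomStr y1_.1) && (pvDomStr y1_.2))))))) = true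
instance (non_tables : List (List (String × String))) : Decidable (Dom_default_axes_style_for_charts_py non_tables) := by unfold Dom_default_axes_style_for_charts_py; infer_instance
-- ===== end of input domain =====

-- B replaces A's build-list-then-two-scans with one single pass (early exit on geometry,
-- a flag for cross); objective: simpler. Equivalence of return values is proved below.

-- ===== PORT A =====
-- str(c.get("type", "")).strip().lower(); dict.get = first-match lookup on the assoc list
def pvNormType (c : List (String × String)) : String :=
  PySem.Str.lower (PySem.Str.strip ((c.lookup "type").getD ""))

def default_axes_style_for_charts_py (non_tables : List (List (String × String))) : String :=
  -- types = []; for c in non_tables: types.append(...)   (isinstance(c, dict) is always true here)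
  let types : List String := non_tables.foldl (fun acc c => acc ++ [pvNormType c]) []
  if types.any (fun t => t == "geometry") then "none"
  else if types.any (fun t => t == "function" || t == "parametric") then "cross"
  else "l"

-- ===== PORT B =====
-- single loop with early return and found_cross flag, as in Source B
def pvAltLoop : List (List (String × String)) → Bool → String
  | [], found_cross => if found_cross then "cross" else "l"
  | c :: rest, found_cross =>
      let t := PySem.Str.lower (PySem.Str.strip ((c.lookup "type").getD ""))
      if t == "geometry" then "none"
      else pvAltLoop rest (found_cross || (t == "function" || t == "parametric"))

def default_axes_style_for_charts_py_alt (non_tables : List (List (String × String))) : String :=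
  pvAltLoop non_tables false

-- ===== PRECONDITION & SPEC =====
def Spec_default_axes_style_for_charts_py (non_tables : List (List (String × String))) (out : String) : Prop := out = default_axes_style_for_charts_py_alt non_tables
instance (non_tables : List (List (String × String))) (out : String) : Decidable (Spec_default_axes_style_for_charts_py non_tables out) := by unfold Spec_default_axes_style_for_charts_py; infer_instance

-- ===== CLAIM (what is proved, stated in full; the proofs are below) =====
def Claim_equal_default_axes_style_for_charts_py : Prop := ∀ (non_tables : List (List (String × String))), Dom_default_axes_style_for_charts_py non_tables → Spec_default_axes_style_for_charts_py non_tables (default_axes_style_for_charts_py non_tables)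

-- ===== LEMMAS AND PROOFS =====

theorem pvAltLoop_characterize (nts : List (List (String × String))) (found : Bool) :
    pvAltLoop nts found =
      if (nts.map pvNormType).any (fun t => t == "geometry") then "none"
      else if found || (nts.map pvNormType).any (fun t => t == "function" || t == "parametric") then "cross"
      else "l" := by
  induction nts generalizing found with
  | nil => simp [pvAltLoop]
  | cons c rest ih =>
      by_cases hg : PySem.Str.lower (PySem.Str.strip ((c.lookup "type").getD "")) == "geometry"
      · simp [pvAltLoop, pvNormType, hg]
      · simp only [pvAltLoop, ih, pvNormType, List.map_cons, List.any_cons, hg, Bool.false_or]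
        simp [Bool.or_assoc]

-- ===== VERDICT (by name: the statement is the Claim_ definition above) =====
theorem default_axes_style_for_charts_py_spec : Claim_equal_default_axes_style_for_charts_py := by
  intro nts _
  unfold Spec_default_axes_style_for_charts_py default_axes_style_for_charts_py default_axes_style_for_charts_py_alt
  rw [pvAltLoop_characterize, PySem.List.foldl_append_singleton_eq_map]
  simp
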